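-- pv_equiv track=rewrite | github.com/lszwaba/algorytmiczne_teorie_grafow | graf_zajecia.py | deg
-- ===== SOURCE A (Python) =====
-- def deg(graph):
--     """
--     Funkcaja zwraca slownik z wierzcholkami i jego stopniami
--     ."""
--     deg_V = {}
--     #petla tworzy liste wszytkich wierzcholkow
--     list_V = [key for key in graph.keys()]
--     for value in graph.values():
--         list_V.extend(value)
--     #lista wierzcholkow z value slownika
--     list_value = []
--     for value in graph.values():
--         list_value.extend(value)
--     for v in list_V:
--         if v in graph.keys():
--             deg_V[v] = len(graph[v]) + list_value.count(v)
--         elif v in list_value: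
--             deg_V[v] = list_value.count(v)
--     return deg_V
-- ===== SOURCE B (Python) =====
-- def deg(graph):
--     """Degree dict: one pass setting out-degrees, one pass accumulating incoming edges."""
--     deg_V = {}
--     for u, adj in graph.items():
--         deg_V[u] = len(adj)
--     for adj in graph.values():
--         for w in adj:
--             deg_V[w] = deg_V.get(w, 0) + 1
--     return deg_V
-- ===== Notes on version B (the rewrite author's own statement) =====
-- stated objective: faster
-- what changed: B drops A's intermediate vertex lists and the per-vertex list.count scans, accumulating degrees directly: one pass sets each key's out-degree, a second pass over all adjacency lists increments the target of every edge.
import Mathlib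
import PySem

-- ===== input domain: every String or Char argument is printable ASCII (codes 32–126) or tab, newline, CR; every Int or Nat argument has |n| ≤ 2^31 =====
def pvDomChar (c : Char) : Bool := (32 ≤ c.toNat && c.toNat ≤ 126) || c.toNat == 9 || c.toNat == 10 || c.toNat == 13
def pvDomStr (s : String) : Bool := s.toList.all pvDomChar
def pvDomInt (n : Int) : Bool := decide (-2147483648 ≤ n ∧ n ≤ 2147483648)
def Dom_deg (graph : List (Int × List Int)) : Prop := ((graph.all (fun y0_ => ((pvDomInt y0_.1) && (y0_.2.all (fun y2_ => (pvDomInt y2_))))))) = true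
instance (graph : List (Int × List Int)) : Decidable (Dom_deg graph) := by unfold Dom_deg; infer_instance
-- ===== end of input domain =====

-- B replaces A's intermediate vertex lists and repeated list.count scans by direct
-- degree accumulation (out-degrees first, then one pass over the edges): simpler and O(V+E).

-- ===== PORT A =====
def deg (graph : List (Int × List Int)) : List (Int × Int) :=
  let g := PySem.Dict.mk graph
  -- list_V = [key for key in graph.keys()]; for value in graph.values(): list_V.extend(value)
  let list_V := g.values.foldl (fun acc value => acc ++ value) g.keys
  -- list_value = []; for value in graph.values(): list_value.extend(value)
  let list_value := g.values.foldl (fun acc value => acc ++ value) []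
  let deg_V := list_V.foldl (fun d v =>
      if g.keys.contains v then
        -- deg_V[v] = len(graph[v]) + list_value.count(v)  (graph[v] cannot raise: v is a key)
        d.insert v (((g.getD v []).length : Int) + (PySem.List.count list_value v : Int))
      else if list_value.contains v then
        d.insert v (PySem.List.count list_value v : Int)
      else d)
    PySem.Dict.empty
  deg_V.items

-- ===== PORT B =====
def deg_alt (graph : List (Int × List Int)) : List (Int × Int) :=
  let d1 := graph.foldl (fun d uadj => d.insert uadj.1 (uadj.2.length : Int)) PySem.Dict.empty
  let d2 := graph.foldl (fun d uadj =>
      uadj.2.foldl (fun d w => d.insert w (d.getD w 0 + 1)) d) d1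
  d2.items

-- ===== PRECONDITION & SPEC =====
-- Pre_ requires distinct keys: the association list stands for a Python dict, whose keys
-- are necessarily distinct; duplicate-key lists represent no dict input A could receive.
def Pre_deg (graph : List (Int × List Int)) : Prop := (graph.map Prod.fst).Nodup
instance (graph : List (Int × List Int)) : Decidable (Pre_deg graph) := by unfold Pre_deg; infer_instance
def pvWitness_deg : (List (Int × List Int)) := [(1, [2, 2, 3]), (2, [1])]
def Spec_deg (graph : List (Int × List Int)) (out : List (Int × Int)) : Prop := out = deg_alt graph
instance (graph : List (Int × List Int)) (out : List (Int × Int)) : Decidable (Spec_deg graph out) := by unfold Spec_deg; infer_instance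

-- ===== CLAIM (what is proved, stated in full; the proofs are below) =====
def Claim_equal_deg : Prop := ∀ (graph : List (Int × List Int)), Dom_deg graph → Pre_deg graph → Spec_deg graph (deg graph)

-- ===== LEMMAS AND PROOFS =====

-- 'acc ++ value' folds are flattening
theorem pv_foldl_append {α : Type} (l : List (List α)) (a : List α) :
    l.foldl (fun acc v => acc ++ v) a = a ++ l.flatten := by
  induction l generalizing a with
  | nil => simp
  | cons x l ih => simp [List.foldl_cons, ih, List.append_assoc]

-- a fold of inserts whose values do not depend on the dict: last write wins, value known
theorem pv_getD_foldl_insert_const (l : List Int) (f : Int → Int)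
    (d : PySem.Dict Int Int) (k : Int) (d0 : Int) :
    (l.foldl (fun d x => d.insert x (f x)) d).getD k d0
      = if k ∈ l then f k else d.getD k d0 := by
  induction l generalizing d with
  | nil => simp
  | cons x l ih =>
    simp only [List.foldl_cons, ih, PySem.Dict.getD_insert, List.mem_cons]
    by_cases hx : k ∈ l <;> by_cases hk : k = x <;> simp [hx, hk]

-- first pass of B: pure out-degrees, keyed by the (distinct) keys of graph
theorem pv_getD_d1 (graph : List (Int × List Int)) (hnd : (graph.map Prod.fst).Nodup)
    (d : PySem.Dict Int Int) (k : Int) :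
    (graph.foldl (fun d uadj => d.insert uadj.1 (uadj.2.length : Int)) d).getD k 0
      = if k ∈ graph.map Prod.fst
          then (((PySem.Dict.mk graph).getD k []).length : Int)
          else d.getD k 0 := by
  induction graph generalizing d with
  | nil => simp
  | cons p rest ih =>
    obtain ⟨a, adj⟩ := p
    simp only [List.map_cons, List.nodup_cons] at hnd
    simp only [List.foldl_cons, List.map_cons, List.mem_cons]
    rw [ih hnd.2]
    by_cases hk : k = a
    · have hkm : k ∉ rest.map Prod.fst := hk ▸ hnd.1
      subst hk
      rw [if_neg hkm, if_pos (Or.inl rfl)]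
      simp [PySem.Dict.getD_eq_get?_getD, PySem.Dict.get?_mk_cons]
    · by_cases hm : k ∈ rest.map Prod.fst <;>
        simp [hk, hm, Ne.symm hk, PySem.Dict.getD_eq_get?_getD, PySem.Dict.get?_mk_cons,
          PySem.Dict.get?_insert]

theorem deg_eq_deg_alt (graph : List (Int × List Int)) (hnd : (graph.map Prod.fst).Nodup) :
    deg graph = deg_alt graph := by
  set K : List Int := graph.map Prod.fst with hK
  set V : List Int := (graph.map Prod.snd).flatten with hV
  have hg : (PySem.Dict.mk graph).keys = K := PySem.Dict.keys_mk graph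
  have hgv : (PySem.Dict.mk graph).values = graph.map Prod.snd := PySem.Dict.values_mk graph
  -- the value A stores for a vertex v
  let valA : Int → Int := fun v =>
    if v ∈ K then (((PySem.Dict.mk graph).getD v []).length : Int) + (V.count v : Int)
    else (V.count v : Int)
  -- A's fold is a fold of unconditional inserts of valA over K ++ V
  have hA : deg graph =
      ((K ++ V).foldl (fun d v => d.insert v (valA v)) PySem.Dict.empty).items := by
    unfold deg
    simp only [hg, hgv, pv_foldl_append, List.nil_append, ← hV]
    congr 1
    apply PySem.List.foldl_congr_mem
    intro d v hv
    by_cases hvK : v ∈ K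
    · simp [valA, hvK, PySem.List.count_eq]
    · have hvV : v ∈ V := by
        rcases List.mem_append.mp hv with h | h
        · exact absurd h hvK
        · exact h
      simp [valA, hvK, hvV, PySem.List.count_eq]
  -- B's second fold flattens to a fold over V
  have hB : deg_alt graph =
      (V.foldl (fun d w => d.insert w (d.getD w 0 + 1))
        (graph.foldl (fun d uadj => d.insert uadj.1 (uadj.2.length : Int))
          PySem.Dict.empty)).items := by
    unfold deg_alt
    simp only [hV, List.foldl_flatten, List.foldl_map]
  rw [hA, hB]
  set dA : PySem.Dict Int Int :=
    (K ++ V).foldl (fun d v => d.insert v (valA v)) PySem.Dict.empty with hdA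
  set d1 : PySem.Dict Int Int :=
    graph.foldl (fun d uadj => d.insert uadj.1 (uadj.2.length : Int)) PySem.Dict.empty with hd1
  set dB : PySem.Dict Int Int :=
    V.foldl (fun d w => d.insert w (d.getD w 0 + 1)) d1 with hdB
  -- the two final dicts have the same key list
  have hkA : dA.keys = PySem.Set.ofList (K ++ V) := by
    rw [hdA, PySem.Dict.keys_foldl_insert, PySem.Dict.keys_empty,
      PySem.Set.update_nil_left]
  have hk1 : d1.keys = K := by
    have h := PySem.Dict.keys_foldl_insert_key (ν := Int) graph Prod.fst
      (fun _ uadj => (uadj.2.length : Int)) PySem.Dict.empty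
    rw [hd1, h, PySem.Dict.keys_empty, PySem.Set.update_nil_left, ← hK,
      PySem.Set.ofList_eq_self_of_nodup K hnd]
  have hkB : dB.keys = PySem.Set.update K V := by
    rw [hdB, PySem.Dict.keys_foldl_insert, hk1]
  have hkeys : dA.keys = dB.keys := by
    rw [hkA, hkB, PySem.Set.ofList_append, PySem.Set.ofList_eq_self_of_nodup K hnd]
  have hndA : dA.keys.Nodup := by
    rw [hkA]; exact PySem.Set.nodup_ofList _
  have hndB : dB.keys.Nodup := by
    rw [hkB]; exact PySem.Set.nodup_update K V hnd
  -- the two final dicts agree on every key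
  have hval : ∀ k ∈ dA.keys, dA.getD k 0 = dB.getD k 0 := by
    intro k hk
    have hkKV : k ∈ K ∨ k ∈ V := by
      rw [hkA] at hk
      simpa [List.mem_append] using (PySem.Set.mem_ofList (K ++ V) k).mp hk
    have hmem : k ∈ K ++ V := List.mem_append.mpr hkKV
    have hA' : dA.getD k 0 = valA k := by
      rw [hdA, pv_getD_foldl_insert_const]; simp [hmem]
    have hB' : dB.getD k 0 = d1.getD k 0 + (V.count k : Int) := by
      rw [hdB, PySem.Dict.getD_foldl_insert_add_one]
    have hd1' : d1.getD k 0 =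
        if k ∈ K then (((PySem.Dict.mk graph).getD k []).length : Int) else 0 := by
      rw [hd1, pv_getD_d1 graph hnd]
      simp [← hK, PySem.Dict.getD_empty]
    rw [hA', hB', hd1']
    by_cases hkK : k ∈ K <;> simp [valA, hkK]
  -- equal keys + equal values ⇒ equal item lists
  rw [PySem.Dict.items_eq_map_keys dA hndA 0, PySem.Dict.items_eq_map_keys dB hndB 0, hkeys]
  exact List.map_congr_left (fun k hk => by rw [hval k (hkeys ▸ hk)])

-- ===== VERDICT (by name: the statement is the Claim_ definition above) =====
theorem deg_spec : Claim_equal_deg := by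
  intro graph _ hpre
  unfold Spec_deg
  exact deg_eq_deg_alt graph hpre
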